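-- pv_equiv track=rewrite | github.com/sessaadouni/math_assistant | server/src/application/adapters/legacy_assistant_adapter.py | is_follow_up
-- ===== SOURCE A (Python) =====
-- from typing import Optional, Dict, Any
--
-- def is_follow_up(current_question: str, last_question: Optional[str]) -> bool:
--     """
--     Check if current question is a follow-up.
--
--     Simple heuristic: if current starts with short words like
--     "et", "mais", "donc", "aussi", etc.
--     """
--     if not last_question:
--         return False
--
--     current_lower = current_question.strip().lower()
--     follow_up_words = {"et", "mais", "donc", "aussi", "encore", "puis", "alors", "ensuite"}
--
--     for word in follow_up_words:
--         if current_lower.startswith(word + " "):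
--             return True
--
--     return False
-- ===== SOURCE B (Python) =====
-- def is_follow_up(current_question: str, last_question) -> bool:
--     """Follow-up check: extract the first token once and test membership."""
--     if not last_question:
--         return False
--     follow_up_words = "et mais donc aussi encore puis alors ensuite".split()
--     head, sep, _ = current_question.strip().lower().partition(' ')
--     return bool(sep) and head in follow_up_words
-- ===== Notes on version B (the rewrite author's own statement) =====
-- stated objective: idiomatic
-- what changed: Instead of scanning all 8 follow-up words with startswith(word + ' '), B splits off the first token once with partition(' ') and does a single membership test against a vocabulary built by splitting one string literal.
import Mathlib
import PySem

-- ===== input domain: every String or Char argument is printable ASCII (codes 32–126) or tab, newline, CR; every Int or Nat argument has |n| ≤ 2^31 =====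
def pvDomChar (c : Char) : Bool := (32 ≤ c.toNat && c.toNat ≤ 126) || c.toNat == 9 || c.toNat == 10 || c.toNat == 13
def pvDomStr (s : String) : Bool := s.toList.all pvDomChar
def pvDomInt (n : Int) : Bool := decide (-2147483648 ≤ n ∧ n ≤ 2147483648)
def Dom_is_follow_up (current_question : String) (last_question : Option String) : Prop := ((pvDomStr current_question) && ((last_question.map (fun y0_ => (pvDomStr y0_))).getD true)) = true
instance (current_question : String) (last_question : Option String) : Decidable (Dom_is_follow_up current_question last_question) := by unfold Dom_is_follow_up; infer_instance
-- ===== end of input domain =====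

-- B changes the decomposition: A scans the 8 follow-up words with startswith(word + " ");
-- B extracts the first token once (partition ' ') and does one membership test on a vocabulary
-- built by splitting a single string literal. Same vocabulary, same results.

-- ===== PORT A =====
-- the fixed vocabulary (Python set literal; iteration order is irrelevant: the loop only ORs results)
def pvWordsA : List (List Char) :=
  [['e','t'], ['m','a','i','s'], ['d','o','n','c'], ['a','u','s','s','i'],
   ['e','n','c','o','r','e'], ['p','u','i','s'], ['a','l','o','r','s'], ['e','n','s','u','i','t','e']]

-- the for-loop with early return: try each word in turn
def pvLoopA (cl : List Char) : List (List Char) → Bool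
  | [] => false
  | w :: ws => if PySem.Chars.startswith cl (w ++ [' ']) then true else pvLoopA cl ws

def is_follow_up (current_question : String) (last_question : Option String) : Bool :=
  match last_question with
  | none => false
  | some lq =>
    if lq.toList.isEmpty then false        -- `if not last_question` (empty string is falsy)
    else
      let current_lower := PySem.Chars.lower (PySem.Chars.strip current_question.toList)
      pvLoopA current_lower pvWordsA

-- ===== PORT B =====
-- follow_up_words = "et mais donc aussi encore puis alors ensuite".split()
def pvVocabB : List (List Char) :=
  PySem.Chars.split₀ "et mais donc aussi encore puis alors ensuite".toList

def is_follow_up_alt (current_question : String) (last_question : Option String) : Bool :=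
  if (last_question.getD "").toList.isEmpty then false   -- `if not last_question` (None or "")
  else
    -- head, sep, _ = current_question.strip().lower().partition(' ')  (exact: head = text
    -- before the first space, sep nonempty iff a space occurs); bool(sep) and head in vocab
    let t := PySem.Chars.lower (PySem.Chars.strip current_question.toList)
    (t.any (fun c => c == ' ')) && pvVocabB.contains (t.takeWhile (fun c => c != ' '))

-- ===== PRECONDITION & SPEC =====
def Spec_is_follow_up (current_question : String) (last_question : Option String) (out : Bool) : Prop := out = is_follow_up_alt current_question last_question
instance (current_question : String) (last_question : Option String) (out : Bool) : Decidable (Spec_is_follow_up current_question last_question out) := by unfold Spec_is_follow_up; infer_instance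

-- ===== CLAIM (what is proved, stated in full; the proofs are below) =====
def Claim_equal_is_follow_up : Prop := ∀ (current_question : String) (last_question : Option String), Dom_is_follow_up current_question last_question → Spec_is_follow_up current_question last_question (is_follow_up current_question last_question)

-- ===== LEMMAS AND PROOFS =====

-- a space-free word followed by ' ' is a prefix of cs iff cs contains a space and its first token is the word
lemma prefix_word_space (w : List Char) (hw : ' ' ∉ w) (cs : List Char) :
    (w ++ [' ']) <+: cs ↔ (' ' ∈ cs ∧ cs.takeWhile (fun c => c != ' ') = w) := by
  induction w generalizing cs with
  | nil =>
    cases cs with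
    | nil => simp
    | cons c cs' =>
      simp only [List.nil_append, List.cons_prefix_cons, List.takeWhile_cons, List.mem_cons]
      by_cases hc : c = ' '
      · subst hc; simp
      · simp [bne_iff_ne, hc, Ne.symm hc]
  | cons a w' ih =>
    have ha : a ≠ ' ' := fun h => hw (h ▸ List.mem_cons_self)
    have hw' : ' ' ∉ w' := fun h => hw (List.mem_cons_of_mem _ h)
    cases cs with
    | nil => simp
    | cons c cs' =>
      simp only [List.cons_append, List.cons_prefix_cons, ih hw', List.takeWhile_cons,
        List.mem_cons]
      by_cases hc : c = ' '
      · subst hc; simp [ha]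
      · simp only [bne_iff_ne, ne_eq, hc, not_false_eq_true, if_pos, List.cons.injEq]
        constructor
        · rintro ⟨rfl, hmem, htk⟩
          exact ⟨Or.inr hmem, rfl, htk⟩
        · rintro ⟨hmem, rfl, htk⟩
          refine ⟨rfl, ?_, htk⟩
          rcases hmem with h | h
          · exact absurd h.symm hc
          · exact h

lemma startswith_word_space (w : List Char) (hw : ' ' ∉ w) (cs : List Char) :
    PySem.Chars.startswith cs (w ++ [' '])
      = (cs.any (fun c => c == ' ') && (cs.takeWhile (fun c => c != ' ') == w)) := by
  rw [Bool.eq_iff_iff]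
  simp [PySem.Chars.startswith_iff, prefix_word_space w hw cs, List.any_eq_true]

-- splitting the vocabulary string literal yields exactly A's eight words
lemma vocabB_eq : pvVocabB = pvWordsA := by decide

theorem is_follow_up_spec : Claim_equal_is_follow_up := by
  unfold Claim_equal_is_follow_up
  intro cq lq _
  unfold Spec_is_follow_up is_follow_up is_follow_up_alt
  rw [vocabB_eq]
  cases lq with
  | none => rfl
  | some l =>
    by_cases hl : l.toList.isEmpty
    · simp [hl]
    · simp only [Option.getD_some, hl, if_false, Bool.false_eq_true]
      set cs := PySem.Chars.lower (PySem.Chars.strip cq.toList) with hcs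
      simp only [pvLoopA, pvWordsA,
        startswith_word_space ['e','t'] (by decide) cs,
        startswith_word_space ['m','a','i','s'] (by decide) cs,
        startswith_word_space ['d','o','n','c'] (by decide) cs,
        startswith_word_space ['a','u','s','s','i'] (by decide) cs,
        startswith_word_space ['e','n','c','o','r','e'] (by decide) cs,
        startswith_word_space ['p','u','i','s'] (by decide) cs,
        startswith_word_space ['a','l','o','r','s'] (by decide) cs,
        startswith_word_space ['e','n','s','u','i','t','e'] (by decide) cs]
      cases hany : cs.any (fun c => c == ' ') <;>
        cases htk : (cs.takeWhile (fun c => c != ' ')) <;>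
          simp_all [List.contains_eq_mem, List.mem_cons]
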